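-- pv_equiv track=rewrite | github.com/kevcjones/aoc-2022-python | python/day10.py | convert
-- ===== SOURCE A (Python) =====
-- def convert(raw):
--     input = raw.split('\n')
--     value = 1
--     summed_taly = [1]
--     for op in input:
--         if op == 'noop':
--             summed_taly.append(value)
--         else:
--             parts = op.split()
--             if parts[0] == 'addx':
--                 summed_taly.append(value)
--                 value += int(parts[1])
--                 summed_taly.append(value)
--     return summed_taly
-- ===== SOURCE B (Python) =====
-- def convert(raw):
--     deltas = []
--     for op in raw.split('\n'):
--         if op == 'noop':
--             deltas.append(0)
--         else:
--             parts = op.split()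
--             if parts[0] == 'addx':
--                 deltas.append(0)
--                 deltas.append(int(parts[1]))
--     out = [1]
--     value = 1
--     for d in deltas:
--         value += d
--         out.append(value)
--     return out
-- ===== Notes on version B (the rewrite author's own statement) =====
-- stated objective: alternative
-- what changed: B first collects per-cycle register deltas (0 for noop, 0 then the addend for addx) in one pass and then produces the tally as prefix sums starting from 1 in a second pass, instead of interleaving the running register value with the output list.
import Mathlib
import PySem

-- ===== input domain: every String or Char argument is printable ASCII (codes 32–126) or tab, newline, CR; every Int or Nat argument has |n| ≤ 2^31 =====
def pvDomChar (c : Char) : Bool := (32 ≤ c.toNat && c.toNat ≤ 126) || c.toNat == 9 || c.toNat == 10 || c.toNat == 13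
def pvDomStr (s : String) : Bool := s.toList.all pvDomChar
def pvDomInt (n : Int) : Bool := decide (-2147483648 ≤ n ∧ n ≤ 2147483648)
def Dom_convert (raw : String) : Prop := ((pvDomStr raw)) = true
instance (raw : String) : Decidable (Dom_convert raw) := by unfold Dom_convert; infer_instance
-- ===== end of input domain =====

-- B re-phrases A as a deltas pass followed by a prefix-sum pass (alternative decomposition, same cost).

-- ===== PORT A =====
-- the loop: state = (value, summed_taly); appends to the tally while updating value
def convertLoopA : List String → Int → List Int → List Int
  | [], _, tally => tally
  | op :: rest, value, tally =>
    if op = "noop" then convertLoopA rest value (tally ++ [value])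
    else
      -- parts[0]: on parts = [] Python raises IndexError (excluded by Pre_convert; headD "" ≠ "addx" there)
      let parts := PySem.Str.split₀ op
      if parts.headD "" = "addx" then
        -- int(parts[1]); a missing or non-int token raises in Python (excluded by Pre_convert)
        let inc := (PySem.Int.ofStr? (parts.getD 1 "")).getD 0
        convertLoopA rest (value + inc) (tally ++ [value, value + inc])
      else convertLoopA rest value tally

def convert (raw : String) : List Int :=
  convertLoopA ((PySem.Str.split? raw "\n").getD []) 1 [1]

-- ===== PORT B =====
-- first pass: per-cycle deltas
def deltasLoopB : List String → List Int → List Int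
  | [], ds => ds
  | op :: rest, ds =>
    if op = "noop" then deltasLoopB rest (ds ++ [0])
    else
      -- parts[0]: on parts = [] Python raises IndexError (excluded by Pre_convert; headD "" ≠ "addx" there)
      let parts := PySem.Str.split₀ op
      if parts.headD "" = "addx" then
        deltasLoopB rest (ds ++ [0, (PySem.Int.ofStr? (parts.getD 1 "")).getD 0])
      else deltasLoopB rest ds

-- second pass: prefix sums starting from 1
def sumLoopB : List Int → Int → List Int → List Int
  | [], _, out => out
  | d :: ds, value, out => sumLoopB ds (value + d) (out ++ [value + d])

def convert_alt (raw : String) : List Int :=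
  sumLoopB (deltasLoopB ((PySem.Str.split? raw "\n").getD []) []) 1 [1]

-- ===== PRECONDITION & SPEC =====
-- Pre_ excludes exactly the inputs where the Python A raises: a non-'noop' line with no tokens
-- (IndexError on parts[0]) or an 'addx' line without a valid int second token (IndexError/ValueError).
def pvLineOK (op : String) : Bool :=
  op == "noop" ||
  (let parts := PySem.Str.split₀ op
   parts ≠ [] &&
   (parts.headD "" != "addx" || (2 ≤ parts.length && (PySem.Int.ofStr? (parts.getD 1 "")).isSome)))

def Pre_convert (raw : String) : Prop :=
  ∀ op ∈ (PySem.Str.split? raw "\n").getD [], pvLineOK op = true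
instance (raw : String) : Decidable (Pre_convert raw) := by unfold Pre_convert; infer_instance

def pvWitness_convert : String := "noop\naddx 3"

def Spec_convert (raw : String) (out : List Int) : Prop := out = convert_alt raw
instance (raw : String) (out : List Int) : Decidable (Spec_convert raw out) := by unfold Spec_convert; infer_instance

-- ===== CLAIM (what is proved, stated in full; the proofs are below) =====
def Claim_equal_convert : Prop := ∀ (raw : String), Dom_convert raw → Pre_convert raw → Spec_convert raw (convert raw)

-- ===== LEMMAS AND PROOFS =====

-- deltasLoopB is a pure accumulator: what it appends does not depend on ds
theorem deltasLoopB_append (lines : List String) (ds : List Int) :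
    deltasLoopB lines ds = ds ++ deltasLoopB lines [] := by
  induction lines generalizing ds with
  | nil => simp [deltasLoopB]
  | cons op rest ih =>
    simp only [deltasLoopB, List.nil_append]
    split_ifs with h h2
    · rw [ih (ds ++ [0]), ih [0], List.append_assoc]
    · rw [ih (ds ++ _), ih ([0, _]), List.append_assoc]
    · exact ih ds

-- main invariant: A's fused loop equals B's two passes from any state
theorem loopA_eq_sum_deltas (lines : List String) (value : Int) (tally : List Int) :
    convertLoopA lines value tally = sumLoopB (deltasLoopB lines []) value tally := by
  induction lines generalizing value tally with
  | nil => simp [convertLoopA, deltasLoopB, sumLoopB]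
  | cons op rest ih =>
    simp only [convertLoopA, deltasLoopB, List.nil_append]
    split_ifs with h h2
    · rw [deltasLoopB_append rest [0]]
      simp only [List.singleton_append, sumLoopB, add_zero]
      exact ih value (tally ++ [value])
    · rw [deltasLoopB_append rest [0, _]]
      simp only [List.cons_append, List.nil_append, sumLoopB, add_zero]
      rw [List.append_assoc]
      exact ih _ _
    · exact ih value tally

-- ===== VERDICT (by name: the statement is the Claim_ definition above) =====
theorem convert_spec : Claim_equal_convert := by
  intro raw _ _
  unfold Spec_convert convert convert_alt
  exact loopA_eq_sum_deltas _ 1 [1]
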